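-- pv_equiv track=rewrite | github.com/cionny/srilanka_floods | src/map_utils.py | get_color_for_metric
-- ===== SOURCE A (Python) =====
-- SITREP_COLORS = ['#f7f7f7', '#fef0d9', '#fdcc8a', '#fc8d59', '#e34a33', '#b30000', '#7f0000']
--
-- METRIC_CONFIG = {
--     "people_affected": {
--         "label": "People Affected",
--         "thresholds": [1, 10000, 50000, 100000, 200000, 350000],
--         "format": lambda x: f"{x:,}"
--     },
--     "people_displaced": {
--         "label": "People Displaced",
--         "thresholds": [1, 500, 2000, 5000, 10000, 20000],
--         "format": lambda x: f"{x:,}"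
--     },
--     "deaths": {
--         "label": "Deaths",
--         "thresholds": [1, 10, 25, 50, 75, 100],
--         "format": lambda x: str(x)
--     },
--     "missing": {
--         "label": "Missing Persons",
--         "thresholds": [1, 5, 10, 20, 30, 50],
--         "format": lambda x: str(x)
--     },
--     "houses_fully_damaged": {
--         "label": "Houses Fully Damaged",
--         "thresholds": [1, 50, 100, 250, 400, 500],
--         "format": lambda x: f"{x:,}"
--     },
--     "houses_partially_damaged": {
--         "label": "Houses Partially Damaged",
--         "thresholds": [1, 500, 2000, 5000, 7500, 10000],
--         "format": lambda x: f"{x:,}"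
--     }
-- }
--
-- def get_color_for_metric(value: int, metric: str) -> str:
--     """Get color for a value based on the metric's thresholds using consistent palette."""
--     config = METRIC_CONFIG.get(metric, METRIC_CONFIG["people_affected"])
--     thresholds = config["thresholds"]
--
--     if value == 0:
--         return SITREP_COLORS[0]  # Light gray for 0
--
--     for i, threshold in enumerate(thresholds):
--         if value < threshold:
--             return SITREP_COLORS[i]
--     return SITREP_COLORS[-1]  # Highest color for values above all thresholds
-- ===== SOURCE B (Python) =====
-- SITREP_COLORS = ['#f7f7f7', '#fef0d9', '#fdcc8a', '#fc8d59', '#e34a33', '#b30000', '#7f0000']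
--
-- METRIC_CONFIG = {
--     "people_affected": {
--         "label": "People Affected",
--         "thresholds": [1, 10000, 50000, 100000, 200000, 350000],
--         "format": lambda x: f"{x:,}"
--     },
--     "people_displaced": {
--         "label": "People Displaced",
--         "thresholds": [1, 500, 2000, 5000, 10000, 20000],
--         "format": lambda x: f"{x:,}"
--     },
--     "deaths": {
--         "label": "Deaths",
--         "thresholds": [1, 10, 25, 50, 75, 100],
--         "format": lambda x: str(x)
--     },
--     "missing": {
--         "label": "Missing Persons",
--         "thresholds": [1, 5, 10, 20, 30, 50],
--         "format": lambda x: str(x)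
--     },
--     "houses_fully_damaged": {
--         "label": "Houses Fully Damaged",
--         "thresholds": [1, 50, 100, 250, 400, 500],
--         "format": lambda x: f"{x:,}"
--     },
--     "houses_partially_damaged": {
--         "label": "Houses Partially Damaged",
--         "thresholds": [1, 500, 2000, 5000, 7500, 10000],
--         "format": lambda x: f"{x:,}"
--     }
-- }
--
-- def _bisect_right(a, x):
--     """Index of the first element strictly greater than x (a sorted)."""
--     lo, hi = 0, len(a)
--     while lo < hi:
--         mid = (lo + hi) // 2
--         if x < a[mid]:
--             hi = mid
--         else:
--             lo = mid + 1
--     return lo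
--
-- def get_color_for_metric(value: int, metric: str) -> str:
--     """Get color for a value based on the metric's thresholds using consistent palette."""
--     config = METRIC_CONFIG.get(metric, METRIC_CONFIG["people_affected"])
--     thresholds = config["thresholds"]
--     # SITREP_COLORS has len(thresholds)+1 entries: index = count of thresholds <= value
--     return SITREP_COLORS[_bisect_right(thresholds, value)]
-- ===== Notes on version B (the rewrite author's own statement) =====
-- stated objective: alternative
-- what changed: Replaces A's enumerate linear scan with its separate value==0 guard by a hand-written binary search (bisect_right) over the thresholds, indexing the 7-color palette directly with the count of thresholds <= value.
import Mathlib
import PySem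

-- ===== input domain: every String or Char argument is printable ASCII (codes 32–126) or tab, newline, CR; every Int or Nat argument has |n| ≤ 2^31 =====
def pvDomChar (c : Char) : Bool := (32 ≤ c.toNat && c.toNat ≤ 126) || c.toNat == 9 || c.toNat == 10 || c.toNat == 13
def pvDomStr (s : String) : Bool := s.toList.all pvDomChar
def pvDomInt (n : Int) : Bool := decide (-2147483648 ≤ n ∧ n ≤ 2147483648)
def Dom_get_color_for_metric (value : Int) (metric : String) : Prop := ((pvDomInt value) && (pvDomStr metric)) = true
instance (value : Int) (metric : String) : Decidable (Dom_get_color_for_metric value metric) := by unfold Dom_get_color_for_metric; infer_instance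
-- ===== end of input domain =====

-- B replaces A's enumerate loop (and its separate value == 0 guard) by a hand-written binary
-- search for the first threshold strictly above value; alternative algorithm, no speed claim.

-- Module-level constants shared by both Pythons (METRIC_CONFIG's label/format fields are
-- unused by this function; only the "thresholds" field is ported).
def pvColors : List String :=
  ["#f7f7f7", "#fef0d9", "#fdcc8a", "#fc8d59", "#e34a33", "#b30000", "#7f0000"]

def pvConfig : List (String × List Int) :=
  [("people_affected", [1, 10000, 50000, 100000, 200000, 350000]),
   ("people_displaced", [1, 500, 2000, 5000, 10000, 20000]),
   ("deaths", [1, 10, 25, 50, 75, 100]),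
   ("missing", [1, 5, 10, 20, 30, 50]),
   ("houses_fully_damaged", [1, 50, 100, 250, 400, 500]),
   ("houses_partially_damaged", [1, 500, 2000, 5000, 7500, 10000])]

-- METRIC_CONFIG.get(metric, METRIC_CONFIG["people_affected"])["thresholds"] — identical line
-- in both Pythons (assoc-list first-match lookup with the people_affected default)
def pvThresholds (metric : String) : List Int :=
  ((pvConfig.find? (fun p => p.1 == metric)).map (·.2)).getD [1, 10000, 50000, 100000, 200000, 350000]

-- ===== PORT A =====
-- 'for i, threshold in enumerate(thresholds): if value < threshold: return SITREP_COLORS[i]'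
def pvLoopA (value : Int) : Nat → List Int → String
  | _, [] => PySem.List.pyGetD pvColors (-1) ""          -- return SITREP_COLORS[-1]
  | i, t :: ts =>
      if value < t then PySem.List.pyGetD pvColors (i : Int) ""
      else pvLoopA value (i + 1) ts

def get_color_for_metric (value : Int) (metric : String) : String :=
  let thresholds := pvThresholds metric
  if value = 0 then PySem.List.pyGetD pvColors 0 ""      -- light gray for 0
  else pvLoopA value 0 thresholds

-- ===== PORT B =====
-- Source B's hand-written _bisect_right: while lo < hi: mid = (lo + hi) // 2; …
-- fuel = hi - lo bounds the iteration count (hi - lo strictly decreases each pass)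
def pvBsrGo (a : List Int) (x : Int) : Nat → Nat → Nat → Nat
  | 0, lo, _ => lo
  | fuel + 1, lo, hi =>
      if lo < hi then
        let mid := (lo + hi) / 2
        if x < a.getD mid 0 then pvBsrGo a x fuel lo mid
        else pvBsrGo a x fuel (mid + 1) hi
      else lo

def pvBisectRight (a : List Int) (x : Int) : Nat :=
  pvBsrGo a x a.length 0 a.length

def get_color_for_metric_alt (value : Int) (metric : String) : String :=
  let thresholds := pvThresholds metric
  PySem.List.pyGetD pvColors ((pvBisectRight thresholds value : Nat) : Int) ""

-- ===== PRECONDITION & SPEC =====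
def Spec_get_color_for_metric (value : Int) (metric : String) (out : String) : Prop := out = get_color_for_metric_alt value metric
instance (value : Int) (metric : String) (out : String) : Decidable (Spec_get_color_for_metric value metric out) := by unfold Spec_get_color_for_metric; infer_instance

-- ===== CLAIM (what is proved, stated in full; the proofs are below) =====
def Claim_equal_get_color_for_metric : Prop := ∀ (value : Int) (metric : String), Dom_get_color_for_metric value metric → Spec_get_color_for_metric value metric (get_color_for_metric value metric)

-- ===== LEMMAS AND PROOFS =====

-- A's guarded linear scan agrees with B's binary search, one lemma per threshold list
theorem pvAgree1 : ∀ v : Int,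
    (if v = 0 then PySem.List.pyGetD pvColors 0 "" else pvLoopA v 0 [1, 10000, 50000, 100000, 200000, 350000])
      = PySem.List.pyGetD pvColors ((pvBisectRight [1, 10000, 50000, 100000, 200000, 350000] v : Nat) : Int) "" := by
  intro v
  simp only [pvBisectRight, pvBsrGo, pvLoopA, List.length, List.getD]
  norm_num
  split_ifs <;> first | rfl | omega

theorem pvAgree2 : ∀ v : Int,
    (if v = 0 then PySem.List.pyGetD pvColors 0 "" else pvLoopA v 0 [1, 500, 2000, 5000, 10000, 20000])
      = PySem.List.pyGetD pvColors ((pvBisectRight [1, 500, 2000, 5000, 10000, 20000] v : Nat) : Int) "" := by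
  intro v
  simp only [pvBisectRight, pvBsrGo, pvLoopA, List.length, List.getD]
  norm_num
  split_ifs <;> first | rfl | omega

theorem pvAgree3 : ∀ v : Int,
    (if v = 0 then PySem.List.pyGetD pvColors 0 "" else pvLoopA v 0 [1, 10, 25, 50, 75, 100])
      = PySem.List.pyGetD pvColors ((pvBisectRight [1, 10, 25, 50, 75, 100] v : Nat) : Int) "" := by
  intro v
  simp only [pvBisectRight, pvBsrGo, pvLoopA, List.length, List.getD]
  norm_num
  split_ifs <;> first | rfl | omega

theorem pvAgree4 : ∀ v : Int,
    (if v = 0 then PySem.List.pyGetD pvColors 0 "" else pvLoopA v 0 [1, 5, 10, 20, 30, 50])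
      = PySem.List.pyGetD pvColors ((pvBisectRight [1, 5, 10, 20, 30, 50] v : Nat) : Int) "" := by
  intro v
  simp only [pvBisectRight, pvBsrGo, pvLoopA, List.length, List.getD]
  norm_num
  split_ifs <;> first | rfl | omega

theorem pvAgree5 : ∀ v : Int,
    (if v = 0 then PySem.List.pyGetD pvColors 0 "" else pvLoopA v 0 [1, 50, 100, 250, 400, 500])
      = PySem.List.pyGetD pvColors ((pvBisectRight [1, 50, 100, 250, 400, 500] v : Nat) : Int) "" := by
  intro v
  simp only [pvBisectRight, pvBsrGo, pvLoopA, List.length, List.getD]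
  norm_num
  split_ifs <;> first | rfl | omega

theorem pvAgree6 : ∀ v : Int,
    (if v = 0 then PySem.List.pyGetD pvColors 0 "" else pvLoopA v 0 [1, 500, 2000, 5000, 7500, 10000])
      = PySem.List.pyGetD pvColors ((pvBisectRight [1, 500, 2000, 5000, 7500, 10000] v : Nat) : Int) "" := by
  intro v
  simp only [pvBisectRight, pvBsrGo, pvLoopA, List.length, List.getD]
  norm_num
  split_ifs <;> first | rfl | omega

-- ===== VERDICT (by name: the statement is the Claim_ definition above) =====
theorem get_color_for_metric_spec : Claim_equal_get_color_for_metric := by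
  intro value metric _
  show get_color_for_metric value metric = get_color_for_metric_alt value metric
  unfold get_color_for_metric get_color_for_metric_alt
  by_cases h1 : metric = "people_affected"
  · subst h1; exact pvAgree1 value
  by_cases h2 : metric = "people_displaced"
  · subst h2; exact pvAgree2 value
  by_cases h3 : metric = "deaths"
  · subst h3; exact pvAgree3 value
  by_cases h4 : metric = "missing"
  · subst h4; exact pvAgree4 value
  by_cases h5 : metric = "houses_fully_damaged"
  · subst h5; exact pvAgree5 value
  by_cases h6 : metric = "houses_partially_damaged"
  · subst h6; exact pvAgree6 value
  have hdef : pvThresholds metric = [1, 10000, 50000, 100000, 200000, 350000] := by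
    simp [pvThresholds, pvConfig, List.find?,
      beq_eq_false_iff_ne.mpr (Ne.symm h1), beq_eq_false_iff_ne.mpr (Ne.symm h2),
      beq_eq_false_iff_ne.mpr (Ne.symm h3), beq_eq_false_iff_ne.mpr (Ne.symm h4),
      beq_eq_false_iff_ne.mpr (Ne.symm h5), beq_eq_false_iff_ne.mpr (Ne.symm h6)]
  rw [hdef]
  exact pvAgree1 value
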